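-- pv_equiv track=rewrite | github.com/iCate66/ms_pacman_ga | 3_MOO_NEAT/game_utils.py | detect_walls_from_pills
-- ===== SOURCE A (Python) =====
-- def detect_walls_from_pills(player_pos, pill_positions, powerpill_positions, threshold=10):
--     """Detect walls by analysing pill placement around the player position"""
--     walls = {
--         'up': True,     # Assume walls by default
--         'right': True,
--         'down': True,
--         'left': True
--     }
--
--     if not player_pos:
--         return walls
--
--     x, y = player_pos
--
--     # Look for pills/paths in each direction
--     for pill_pos in pill_positions + powerpill_positions:
--         px, py = pill_pos
--
--         # Check if pill is aligned horizontally or vertically with player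
--         if abs(px - x) < threshold:  # Vertically aligned
--             if py < y and abs(py - y) < threshold:
--                 walls['up'] = False    # No wall above
--             elif py > y and abs(py - y) < threshold:
--                 walls['down'] = False  # No wall below
--
--         if abs(py - y) < threshold:  # Horizontally aligned
--             if px > x and abs(px - x) < threshold:
--                 walls['right'] = False  # No wall to right
--             elif px < x and abs(px - x) < threshold:
--                 walls['left'] = False   # No wall to left
--
--     return walls
-- ===== SOURCE B (Python) =====
-- def detect_walls_from_pills(player_pos, pill_positions, powerpill_positions, threshold=10):
--     """Detect walls by analysing pill placement around the player position"""
--     walls = {'up': True, 'right': True, 'down': True, 'left': True}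
--     if not player_pos:
--         return walls
--     x, y = player_pos
--     pills = pill_positions + powerpill_positions
--     def near(px, py):
--         return abs(px - x) < threshold and abs(py - y) < threshold
--     return {
--         'up':    not any(near(px, py) and py < y for px, py in pills),
--         'right': not any(near(px, py) and px > x for px, py in pills),
--         'down':  not any(near(px, py) and py > y for px, py in pills),
--         'left':  not any(near(px, py) and px < x for px, py in pills),
--     }
-- ===== Notes on version B (the rewrite author's own statement) =====
-- stated objective: simpler
-- what changed: Replaces the default-True dict plus in-loop flag flipping (with nested if/elif mutation) by four independent existential any() scans, one per direction, building the result dict directly from those four predicates.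
import Mathlib
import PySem

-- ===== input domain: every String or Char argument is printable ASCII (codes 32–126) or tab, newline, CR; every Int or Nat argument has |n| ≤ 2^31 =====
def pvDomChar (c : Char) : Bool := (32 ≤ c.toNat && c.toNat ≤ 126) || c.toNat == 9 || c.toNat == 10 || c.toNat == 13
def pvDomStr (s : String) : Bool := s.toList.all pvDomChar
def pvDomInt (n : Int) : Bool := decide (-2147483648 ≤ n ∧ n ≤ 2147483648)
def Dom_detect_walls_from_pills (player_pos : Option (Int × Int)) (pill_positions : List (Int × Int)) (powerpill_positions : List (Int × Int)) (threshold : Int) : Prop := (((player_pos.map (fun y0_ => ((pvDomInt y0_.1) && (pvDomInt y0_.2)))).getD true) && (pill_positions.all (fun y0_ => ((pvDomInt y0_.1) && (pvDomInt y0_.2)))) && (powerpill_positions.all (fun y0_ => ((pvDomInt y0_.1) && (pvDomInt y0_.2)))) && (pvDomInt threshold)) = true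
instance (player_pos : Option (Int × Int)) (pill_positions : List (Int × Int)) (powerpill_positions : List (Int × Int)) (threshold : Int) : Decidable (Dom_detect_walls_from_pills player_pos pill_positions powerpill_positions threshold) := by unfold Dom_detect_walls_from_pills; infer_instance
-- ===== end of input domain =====

-- B replaces A's default-True dict mutated by in-loop flag flips with four independent
-- existential scans (one per direction); objective: simpler. Same return value everywhere.

-- ===== PORT A =====
-- the body of A's for-loop, acting on the walls dict
def pvStepA (x y threshold : Int) (walls : PySem.Dict String Bool) (pill_pos : Int × Int) : PySem.Dict String Bool :=
  let px := pill_pos.1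
  let py := pill_pos.2
  let walls :=
    if |px - x| < threshold then
      (if py < y ∧ |py - y| < threshold then walls.insert "up" false
       else if py > y ∧ |py - y| < threshold then walls.insert "down" false
       else walls)
    else walls
  if |py - y| < threshold then
    (if px > x ∧ |px - x| < threshold then walls.insert "right" false
     else if px < x ∧ |px - x| < threshold then walls.insert "left" false
     else walls)
  else walls

def detect_walls_from_pills (player_pos : Option (Int × Int)) (pill_positions : List (Int × Int)) (powerpill_positions : List (Int × Int)) (threshold : Int) : List (String × Bool) :=
  let walls : PySem.Dict String Bool :=
    PySem.Dict.ofList [("up", true), ("right", true), ("down", true), ("left", true)]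
  match player_pos with
  | none => walls.items
  | some (x, y) =>
    ((pill_positions ++ powerpill_positions).foldl (pvStepA x y threshold) walls).items

-- ===== PORT B =====
def detect_walls_from_pills_alt (player_pos : Option (Int × Int)) (pill_positions : List (Int × Int)) (powerpill_positions : List (Int × Int)) (threshold : Int) : List (String × Bool) :=
  match player_pos with
  | none => [("up", true), ("right", true), ("down", true), ("left", true)]
  | some (x, y) =>
    let pills := pill_positions ++ powerpill_positions
    let near := fun (px py : Int) => decide (|px - x| < threshold) && decide (|py - y| < threshold)
    [("up",    !(pills.any fun p => near p.1 p.2 && decide (p.2 < y))),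
     ("right", !(pills.any fun p => near p.1 p.2 && decide (p.1 > x))),
     ("down",  !(pills.any fun p => near p.1 p.2 && decide (p.2 > y))),
     ("left",  !(pills.any fun p => near p.1 p.2 && decide (p.1 < x)))]

-- ===== PRECONDITION & SPEC =====
def Spec_detect_walls_from_pills (player_pos : Option (Int × Int)) (pill_positions : List (Int × Int)) (powerpill_positions : List (Int × Int)) (threshold : Int) (out : List (String × Bool)) : Prop := out = detect_walls_from_pills_alt player_pos pill_positions powerpill_positions threshold
instance (player_pos : Option (Int × Int)) (pill_positions : List (Int × Int)) (powerpill_positions : List (Int × Int)) (threshold : Int) (out : List (String × Bool)) : Decidable (Spec_detect_walls_from_pills player_pos pill_positions powerpill_positions threshold out) := by unfold Spec_detect_walls_from_pills; infer_instance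

-- ===== CLAIM (what is proved, stated in full; the proofs are below) =====
def Claim_equal_detect_walls_from_pills : Prop := ∀ (player_pos : Option (Int × Int)) (pill_positions : List (Int × Int)) (powerpill_positions : List (Int × Int)) (threshold : Int), Dom_detect_walls_from_pills player_pos pill_positions powerpill_positions threshold → Spec_detect_walls_from_pills player_pos pill_positions powerpill_positions threshold (detect_walls_from_pills player_pos pill_positions powerpill_positions threshold)

-- ===== LEMMAS AND PROOFS =====

set_option maxHeartbeats 2000000 in
-- A's loop on the 4-key literal dict equals conjoining each flag with the negated any-scan.
lemma pvLoopA (x y threshold : Int) (L : List (Int × Int)) : ∀ (u r d l : Bool),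
    L.foldl (pvStepA x y threshold) (PySem.Dict.mk [("up", u), ("right", r), ("down", d), ("left", l)]) =
    PySem.Dict.mk
      [("up",    u && !(L.any fun p => decide (|p.1 - x| < threshold) && decide (|p.2 - y| < threshold) && decide (p.2 < y))),
       ("right", r && !(L.any fun p => decide (|p.1 - x| < threshold) && decide (|p.2 - y| < threshold) && decide (p.1 > x))),
       ("down",  d && !(L.any fun p => decide (|p.1 - x| < threshold) && decide (|p.2 - y| < threshold) && decide (p.2 > y))),
       ("left",  l && !(L.any fun p => decide (|p.1 - x| < threshold) && decide (|p.2 - y| < threshold) && decide (p.1 < x)))] := by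
  induction L with
  | nil => simp
  | cons hd tl ih =>
    intro u r d l
    simp only [List.foldl_cons, List.any_cons]
    have hstep : ∀ (u r d l : Bool),
        pvStepA x y threshold (PySem.Dict.mk [("up", u), ("right", r), ("down", d), ("left", l)]) hd =
        PySem.Dict.mk
          [("up",    u && !(decide (|hd.1 - x| < threshold) && decide (|hd.2 - y| < threshold) && decide (hd.2 < y))),
           ("right", r && !(decide (|hd.1 - x| < threshold) && decide (|hd.2 - y| < threshold) && decide (hd.1 > x))),
           ("down",  d && !(decide (|hd.1 - x| < threshold) && decide (|hd.2 - y| < threshold) && decide (hd.2 > y))),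
           ("left",  l && !(decide (|hd.1 - x| < threshold) && decide (|hd.2 - y| < threshold) && decide (hd.1 < x)))] := by
      intro u r d l
      clear ih
      obtain ⟨px, py⟩ := hd
      by_cases hA : |px - x| < threshold <;>
      by_cases hB : |py - y| < threshold <;>
      by_cases h1 : py < y <;>
      by_cases h2 : py > y <;>
      by_cases h3 : px < x <;>
      by_cases h4 : px > x <;>
      simp_all [pvStepA, PySem.Dict.insert, PySem.Dict.contains, -not_lt, -not_le] <;>
      first
        | (exfalso; omega)
        | ((repeat first
              | rw [if_pos (show x < px from by omega)]
              | rw [if_neg (show ¬ x < px from by omega)]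
              | rw [if_pos (show px < x from by omega)]
              | rw [if_neg (show ¬ px < x from by omega)]
              | rw [if_pos (show x < px ∧ |px - x| < threshold from by omega)]
              | rw [if_neg (show ¬ (x < px ∧ |px - x| < threshold) from by omega)]
              | rw [if_pos (show px < x ∧ |px - x| < threshold from by omega)]
              | rw [if_neg (show ¬ (px < x ∧ |px - x| < threshold) from by omega)]
              | rw [if_pos (show |px - x| < threshold from by omega)]
              | rw [if_neg (show ¬ |px - x| < threshold from by omega)]
              | rw [if_pos (show |py - y| < threshold from by omega)]
              | rw [if_neg (show ¬ |py - y| < threshold from by omega)]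
              | rw [decide_eq_true (show |px - x| < threshold from by omega)]
              | rw [decide_eq_false (show ¬ |px - x| < threshold from by omega)]
              | rw [decide_eq_true (show |py - y| < threshold from by omega)]
              | rw [decide_eq_false (show ¬ |py - y| < threshold from by omega)]
              | rw [if_pos (show y < py from by omega)]
              | rw [if_neg (show ¬ y < py from by omega)]
              | rw [if_pos (show py < y from by omega)]
              | rw [if_neg (show ¬ py < y from by omega)]
              | rw [decide_eq_true (show x < px from by omega)]
              | rw [decide_eq_false (show ¬ x < px from by omega)]
              | rw [decide_eq_true (show px < x from by omega)]
              | rw [decide_eq_false (show ¬ px < x from by omega)]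
              | rw [decide_eq_true (show y < py from by omega)]
              | rw [decide_eq_false (show ¬ y < py from by omega)]
              | rw [decide_eq_true (show py < y from by omega)]
              | rw [decide_eq_false (show ¬ py < y from by omega)]);
            simp_all)
    rw [hstep, ih]
    simp only [Bool.not_or, Bool.and_assoc]

-- ===== VERDICT (by name: the statement is the Claim_ definition above) =====
theorem detect_walls_from_pills_spec : Claim_equal_detect_walls_from_pills := by
  intro player_pos pill_positions powerpill_positions threshold _
  unfold Spec_detect_walls_from_pills detect_walls_from_pills detect_walls_from_pills_alt
  cases player_pos with
  | none => rfl
  | some p =>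
    obtain ⟨x, y⟩ := p
    have h := pvLoopA x y threshold (pill_positions ++ powerpill_positions) true true true true
    simp only []
    rw [show (PySem.Dict.ofList [("up", true), ("right", true), ("down", true), ("left", true)] : PySem.Dict String Bool) = PySem.Dict.mk [("up", true), ("right", true), ("down", true), ("left", true)] from by decide]
    rw [h]
    simp [Bool.and_comm]
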